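-- pv_equiv track=rewrite | github.com/xjfcnfw3/algorithm | programers/요격 시스템.py | solution
-- ===== SOURCE A (Python) =====
-- def solution(targets):
--     targets.sort(key=lambda x: x[1])
--     end = targets[0][1]
--     answer = 1
--     for i in range(1, len(targets)):
--         if targets[i][0] >= end:
--             end = targets[i][1]
--             answer += 1
--     return answer
-- ===== SOURCE B (Python) =====
-- def solution(targets):
--     # Selection-based greedy: no sorting; repeatedly take the remaining target
--     # with the smallest end (ties by original position) among those starting at
--     # or after the current threshold.  Return value only: A sorts `targets` in
--     # place, B leaves it untouched.
--     pool = list(enumerate(targets))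
--     first = min(pool, key=lambda p: (p[1][1], p[0]))
--     thr = first[1][1]
--     answer = 1
--     pool = [p for p in pool if p[0] != first[0]]
--     while True:
--         cand = [p for p in pool if p[1][0] >= thr]
--         if not cand:
--             return answer
--         best = min(cand, key=lambda p: (p[1][1], p[0]))
--         thr = best[1][1]
--         answer += 1
--         pool = [p for p in cand if p[0] != best[0]]
-- ===== Notes on version B (the rewrite author's own statement) =====
-- stated objective: alternative
-- what changed: A sorts the targets in place by end and makes one greedy scan; B never sorts: it repeatedly selects, by a min over the remaining pool keyed on (end, original index), the next interval starting at or after the current threshold, shrinking the pool as it goes (selection-based greedy instead of sort-then-scan; B also leaves the input list unmutated).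
import Mathlib
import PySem

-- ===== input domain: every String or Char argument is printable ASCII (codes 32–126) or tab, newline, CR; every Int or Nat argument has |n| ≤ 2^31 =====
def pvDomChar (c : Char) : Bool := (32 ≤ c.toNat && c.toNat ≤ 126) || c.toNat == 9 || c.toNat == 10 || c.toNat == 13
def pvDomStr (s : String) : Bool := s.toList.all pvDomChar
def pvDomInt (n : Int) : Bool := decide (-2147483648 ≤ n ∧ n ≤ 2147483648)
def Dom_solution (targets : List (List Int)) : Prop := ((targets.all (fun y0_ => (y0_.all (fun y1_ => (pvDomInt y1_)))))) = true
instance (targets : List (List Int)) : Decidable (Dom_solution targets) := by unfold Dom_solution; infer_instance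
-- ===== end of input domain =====

-- B replaces A's in-place sort + scan by a sort-free repeated-selection greedy (alternative
-- decomposition, same cost class in practice, not claimed faster); A sorts `targets` in place
-- while B leaves it untouched — the equivalence proved here is about the RETURN value only.

-- ===== PORT A =====
-- literal port of A; Pre_solution guarantees every index access succeeds, so pyGetD's
-- defaults are never consulted on admitted inputs.
def solution (targets : List (List Int)) : Int :=
  let s := PySem.List.sorted targets (fun x => PySem.List.pyGetD x 1 0)
  let end0 := PySem.List.pyGetD (PySem.List.pyGetD s 0 []) 1 0
  let r := (PySem.List.pyRange 1 (PySem.List.len s)).foldl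
    (fun (st : Int × Int) i =>
      if PySem.List.pyGetD (PySem.List.pyGetD s i []) 0 0 ≥ st.1 then
        (PySem.List.pyGetD (PySem.List.pyGetD s i []) 1 0, st.2 + 1)
      else st) (end0, 1)
  r.2

-- ===== PORT B =====
-- B-side helpers: end / start of an (index, target) pair
def pvES (p : Int × List Int) : Int := PySem.List.pyGetD p.2 1 0
def pvSS (p : Int × List Int) : Int := PySem.List.pyGetD p.2 0 0

-- the foldl step of Python's min(..., key=lambda p: (p[1][1], p[0])) (= min2? with tuple key)
def pvStep (acc : Option (Int × List Int)) (x : Int × List Int) : Option (Int × List Int) :=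
  match acc with
  | none => some x
  | some m =>
    if (decide (pvES x < pvES m) || !decide (pvES m < pvES x) && decide (x.1 < m.1)) = true
    then some x else some m

theorem pvMin2_eq_foldl (l : List (Int × List Int)) :
    PySem.List.min2? l pvES (fun p => p.1) = l.foldl pvStep none := by
  simp only [PySem.List.min2?]
  congr 1
  funext acc x
  cases acc <;> rfl

-- `min2?` returns an element of the list (needed for termination of pvBloop)
theorem pvMin2_mem_aux (xs : List (Int × List Int)) :
    ∀ (acc : Option (Int × List Int)) (r : Int × List Int),
      xs.foldl pvStep acc = some r → acc = some r ∨ r ∈ xs := by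
  induction xs with
  | nil => intro acc r h; exact Or.inl h
  | cons x t ih =>
    intro acc r h
    simp only [List.foldl_cons] at h
    rcases ih _ r h with h2 | h2
    · cases acc with
      | none => right; simp only [pvStep, Option.some.injEq] at h2; simp [h2]
      | some m =>
        have h2' : (if (decide (pvES x < pvES m) || !decide (pvES m < pvES x) && decide (x.1 < m.1)) = true
            then some x else some m) = some r := h2
        split at h2'
        · right; simp only [Option.some.injEq] at h2'; simp [h2']
        · left; exact h2'
    · right; exact List.mem_cons_of_mem _ h2

theorem pvMin2_mem {l : List (Int × List Int)} {b : Int × List Int}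
    (h : PySem.List.min2? l pvES (fun p => p.1) = some b) : b ∈ l := by
  have h' := h
  rw [pvMin2_eq_foldl] at h'
  rcases pvMin2_mem_aux l none b h' with h2 | h2
  · exact absurd h2 (by simp)
  · exact h2

theorem pvBloop_dec {α : Type} (pool : List α) (P Q : α → Bool) (b : α)
    (hb : b ∈ pool.filter P) (hq : Q b = false) :
    ((pool.filter P).filter Q).length < pool.length := by
  have hsub : List.Sublist ((pool.filter P).filter Q) (pool.filter P) := List.filter_sublist
  have hlt : ((pool.filter P).filter Q).length < (pool.filter P).length := by
    rcases Nat.lt_or_ge ((pool.filter P).filter Q).length (pool.filter P).length with h | h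
    · exact h
    · exfalso
      have heq := hsub.eq_of_length (Nat.le_antisymm hsub.length_le h)
      have hbq : b ∈ (pool.filter P).filter Q := by rw [heq]; exact hb
      rw [List.mem_filter] at hbq
      rw [hbq.2] at hq; exact Bool.noConfusion hq
  exact Nat.lt_of_lt_of_le hlt (List.length_filter_le _ _)

-- the while-loop of B: threshold, running answer, remaining pool
def pvBloop (thr answer : Int) (pool : List (Int × List Int)) : Int :=
  match hm : PySem.List.min2? (pool.filter (fun p => decide (pvSS p ≥ thr))) pvES (fun p => p.1) with
  | none => answer
  | some best =>
    pvBloop (pvES best) (answer + 1)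
      ((pool.filter (fun p => decide (pvSS p ≥ thr))).filter (fun p => decide (p.1 ≠ best.1)))
termination_by pool.length
decreasing_by
  rw [List.unattach_filter (g := fun p => decide (p.1 ≠ best.1)) (hf := fun x h => rfl),
      List.unattach_filter (g := fun p => decide (pvSS p ≥ thr)) (hf := fun x h => rfl),
      List.unattach_attach]
  exact pvBloop_dec pool _ (fun p => decide (p.1 ≠ best.1)) best (pvMin2_mem hm) (by simp)

def solution_alt (targets : List (List Int)) : Int :=
  let pool := PySem.List.enumerate targets
  match PySem.List.min2? pool pvES (fun p => p.1) with
  | none => 0   -- unreachable under Pre_solution (Python's min raises on an empty pool)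
  | some first => pvBloop (pvES first) 1 (pool.filter (fun p => decide (p.1 ≠ first.1)))

-- ===== PRECONDITION & SPEC =====
-- exactly where Python A returns normally: a nonempty list whose rows all have ≥ 2 entries
-- (otherwise targets[0][1] / the sort key x[1] / targets[i][0] raises IndexError, or min/… on empty)
def Pre_solution (targets : List (List Int)) : Prop :=
  targets ≠ [] ∧ ∀ t ∈ targets, 2 ≤ t.length
instance (targets : List (List Int)) : Decidable (Pre_solution targets) := by
  unfold Pre_solution; infer_instance

def pvWitness_solution : List (List Int) := [[1, 4], [3, 7], [4, 5]]

def Spec_solution (targets : List (List Int)) (out : Int) : Prop := out = solution_alt targets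
instance (targets : List (List Int)) (out : Int) : Decidable (Spec_solution targets out) := by unfold Spec_solution; infer_instance

-- ===== CLAIM (what is proved, stated in full; the proofs are below) =====
def Claim_equal_solution : Prop := ∀ (targets : List (List Int)), Dom_solution targets → Pre_solution targets → Spec_solution targets (solution targets)

-- ===== LEMMAS AND PROOFS =====

-- key of A's sort (x[1]) and proof-side notions
def pvKeyE (x : List Int) : Int := PySem.List.pyGetD x 1 0

-- strict "smaller (end, index)" order used by B's selection
def pvLt (p q : Int × List Int) : Prop := pvES p < pvES q ∨ (pvES p = pvES q ∧ p.1 < q.1)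

def pvKey (p : Int × List Int) : Lex (Int × Int) := toLex (pvES p, p.1)

-- the count A's scan produces from a given threshold over the (sorted) tail
def pvAscan : Int → List (List Int) → Int
  | _, [] => 0
  | thr, x :: t =>
    if PySem.List.pyGetD x 0 0 ≥ thr then 1 + pvAscan (PySem.List.pyGetD x 1 0) t
    else pvAscan thr t

-- (end, index)-sorted enumeration: the order in which B's selection picks candidates
def pvE (targets : List (List Int)) : List (Int × List Int) :=
  PySem.List.sorted (PySem.List.enumerate targets) pvKey

theorem pvKey_le_iff {p q : Int × List Int} :
    pvKey p ≤ pvKey q ↔ (pvES p < pvES q ∨ (pvES p = pvES q ∧ p.1 ≤ q.1)) := by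
  simp [pvKey, Prod.Lex.le_iff]

theorem pvStep_some_lt {m x : Int × List Int} (h : pvLt x m) : pvStep (some m) x = some x := by
  have hc : (decide (pvES x < pvES m) || !decide (pvES m < pvES x) && decide (x.1 < m.1)) = true := by
    simp only [Bool.or_eq_true, Bool.and_eq_true, Bool.not_eq_true', decide_eq_true_eq,
      decide_eq_false_iff_not]
    unfold pvLt at h; omega
  simp [pvStep, hc]

theorem pvStep_some_ge {m x : Int × List Int} (h : ¬ pvLt x m) : pvStep (some m) x = some m := by
  have hc : (decide (pvES x < pvES m) || !decide (pvES m < pvES x) && decide (x.1 < m.1)) = false := by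
    simp only [Bool.or_eq_false_iff, Bool.and_eq_false_iff, Bool.not_eq_false', decide_eq_true_eq,
      decide_eq_false_iff_not]
    unfold pvLt at h; omega
  simp [pvStep, hc]

theorem pvMin2_stay (b : Int × List Int) :
    ∀ xs : List (Int × List Int), (∀ q ∈ xs, q = b ∨ pvLt b q) →
      xs.foldl pvStep (some b) = some b := by
  intro xs
  induction xs with
  | nil => intro _; rfl
  | cons x t ih =>
    intro h
    have hx := h x (List.mem_cons_self)
    have hstep : pvStep (some b) x = some b := by
      apply pvStep_some_ge
      rcases hx with rfl | hx
      · unfold pvLt; omega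
      · unfold pvLt at hx ⊢; omega
    simp only [List.foldl_cons, hstep]
    exact ih (fun q hq => h q (List.mem_cons_of_mem _ hq))

theorem pvMin2_aux (b : Int × List Int) :
    ∀ (xs : List (Int × List Int)) (m : Int × List Int),
      (∀ q ∈ xs, q = b ∨ pvLt b q) → pvLt b m → b ∈ xs →
      xs.foldl pvStep (some m) = some b := by
  intro xs
  induction xs with
  | nil => intro m _ _ hb; exact absurd hb (by simp)
  | cons x t ih =>
    intro m h hm hb
    simp only [List.foldl_cons]
    by_cases hxb : x = b
    · subst hxb
      rw [pvStep_some_lt hm]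
      exact pvMin2_stay x t (fun q hq => h q (List.mem_cons_of_mem _ hq))
    · have hbx : pvLt b x := (h x List.mem_cons_self).resolve_left hxb
      have hbt : b ∈ t := by
        rcases List.mem_cons.mp hb with h1 | h1
        · exact absurd h1.symm hxb
        · exact h1
      by_cases hxm : pvLt x m
      · rw [pvStep_some_lt hxm]
        exact ih x (fun q hq => h q (List.mem_cons_of_mem _ hq)) hbx hbt
      · rw [pvStep_some_ge hxm]
        exact ih m (fun q hq => h q (List.mem_cons_of_mem _ hq)) hm hbt

theorem pvMin2_eq {l : List (Int × List Int)} {b : Int × List Int}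
    (hb : b ∈ l) (h : ∀ q ∈ l, q = b ∨ pvLt b q) :
    PySem.List.min2? l pvES (fun p => p.1) = some b := by
  rw [pvMin2_eq_foldl]
  cases l with
  | nil => exact absurd hb (by simp)
  | cons x t =>
    simp only [List.foldl_cons]
    have hx : pvStep none x = some x := rfl
    rw [hx]
    by_cases hxb : x = b
    · subst hxb
      exact pvMin2_stay x t (fun q hq => h q (List.mem_cons_of_mem _ hq))
    · have hbx : pvLt b x := (h x List.mem_cons_self).resolve_left hxb
      have hbt : b ∈ t := by
        rcases List.mem_cons.mp hb with h1 | h1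
        · exact absurd h1.symm hxb
        · exact h1
      exact pvMin2_aux b t x (fun q hq => h q (List.mem_cons_of_mem _ hq)) hbx hbt

theorem pvMin2_isSome :
    ∀ (t : List (Int × List Int)) (m : Int × List Int), ∃ r, t.foldl pvStep (some m) = some r := by
  intro t
  induction t with
  | nil => intro m; exact ⟨m, rfl⟩
  | cons x s ih =>
    intro m
    simp only [List.foldl_cons]
    by_cases hxm : pvLt x m
    · rw [pvStep_some_lt hxm]; exact ih x
    · rw [pvStep_some_ge hxm]; exact ih m

theorem pvMin2_none_iff {l : List (Int × List Int)} :
    PySem.List.min2? l pvES (fun p => p.1) = none ↔ l = [] := by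
  rw [pvMin2_eq_foldl]
  cases l with
  | nil => simp
  | cons x t =>
    simp only [List.foldl_cons]
    have hx : pvStep none x = some x := rfl
    rw [hx]
    obtain ⟨r, hr⟩ := pvMin2_isSome t x
    simp [hr]

theorem pvMin2_isMin_aux :
    ∀ (xs : List (Int × List Int)) (m r : Int × List Int),
      xs.foldl pvStep (some m) = some r →
      ¬ pvLt m r ∧ ∀ q ∈ xs, ¬ pvLt q r := by
  intro xs
  induction xs with
  | nil =>
    intro m r h
    simp only [List.foldl] at h
    obtain rfl : m = r := by simpa using h
    exact ⟨by unfold pvLt; omega, by simp⟩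
  | cons x t ih =>
    intro m r h
    simp only [List.foldl_cons] at h
    by_cases hlt : pvLt x m
    · rw [pvStep_some_lt hlt] at h
      obtain ⟨h1, h2⟩ := ih x r h
      constructor
      · intro hmr; exact h1 (by unfold pvLt at hlt hmr ⊢; omega)
      · intro q hq
        rcases List.mem_cons.mp hq with rfl | hq
        · exact h1
        · exact h2 q hq
    · rw [pvStep_some_ge hlt] at h
      obtain ⟨h1, h2⟩ := ih m r h
      constructor
      · exact h1
      · intro q hq
        rcases List.mem_cons.mp hq with rfl | hq
        · intro hqr; exact h1 (by unfold pvLt at hlt hqr ⊢; omega)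
        · exact h2 q hq

theorem pvMin2_isMin {l : List (Int × List Int)} {b : Int × List Int}
    (h : PySem.List.min2? l pvES (fun p => p.1) = some b) :
    ∀ q ∈ l, ¬ pvLt q b := by
  rw [pvMin2_eq_foldl] at h
  cases l with
  | nil => simp
  | cons x t =>
    simp only [List.foldl_cons] at h
    have hx : pvStep none x = some x := rfl
    rw [hx] at h
    obtain ⟨h1, h2⟩ := pvMin2_isMin_aux t x b h
    intro q hq
    rcases List.mem_cons.mp hq with rfl | hq
    · exact h1
    · exact h2 q hq

-- a min2?-selected element of an fst-distinct pool is ≤ everything: equal or strictly below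
theorem pvMin2_min_or_eq {l : List (Int × List Int)} {b : Int × List Int}
    (h : PySem.List.min2? l pvES (fun p => p.1) = some b)
    (hne : l.Pairwise (fun p q => p.1 ≠ q.1)) :
    ∀ q ∈ l, q = b ∨ pvLt b q := by
  intro q hq
  by_cases hqb : q = b
  · exact Or.inl hqb
  · right
    have hnlt : ¬ pvLt q b := pvMin2_isMin h q hq
    have hb : b ∈ l := pvMin2_mem h
    have hfst : q.1 ≠ b.1 :=
      (List.Pairwise.forall (fun _ _ h e => h e.symm) hne) hq hb hqb
    unfold pvLt at hnlt ⊢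
    omega

-- skipped prefix: elements whose start is below the threshold do not change A's scan
theorem pvAscan_skip (thr : Int) :
    ∀ (xs ys : List (List Int)), (∀ x ∈ xs, ¬ (PySem.List.pyGetD x 0 0 ≥ thr)) →
      pvAscan thr (xs ++ ys) = pvAscan thr ys := by
  intro xs
  induction xs with
  | nil => intro ys _; rfl
  | cons x t ih =>
    intro ys h
    have hx := h x List.mem_cons_self
    simp only [List.cons_append, pvAscan, if_neg hx]
    exact ih ys (fun q hq => h q (List.mem_cons_of_mem _ hq))

-- A's indexed loop, as a fold over the tail list
theorem pvFoldA :
    ∀ (l : List (List Int)) (thr a : Int),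
      (l.foldl (fun (st : Int × Int) x =>
        if PySem.List.pyGetD x 0 0 ≥ st.1 then (PySem.List.pyGetD x 1 0, st.2 + 1) else st)
        (thr, a)).2 = a + pvAscan thr l := by
  intro l
  induction l with
  | nil => intro thr a; simp [pvAscan]
  | cons x t ih =>
    intro thr a
    simp only [List.foldl_cons, pvAscan]
    by_cases h : PySem.List.pyGetD x 0 0 ≥ thr
    · rw [if_pos h, if_pos h, ih]; ring
    · rw [if_neg h, if_neg h, ih]

-- ---- stability: the (end, index)-sorted enumeration projects to A's stable sort by end ----

theorem pvInsertBy_cons {α : Type} (before : α → α → Bool) (x y : α) (ys : List α) :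
    PySem.List.insertBy before x (y :: ys)
      = if before x y then x :: y :: ys else y :: PySem.List.insertBy before x ys := rfl

theorem pvIns_snd (i : Int) (x : List Int) :
    ∀ (acc : List (Int × List Int)), (∀ q ∈ acc, q.1 < i) →
      (PySem.List.insertBy (fun p q => decide (pvKey p < pvKey q)) (i, x) acc).map Prod.snd
        = PySem.List.insertBy (fun a b => decide (pvKeyE a < pvKeyE b)) x (acc.map Prod.snd) := by
  intro acc
  induction acc with
  | nil => intro _; rfl
  | cons q t ih =>
    intro h
    have hq := h q List.mem_cons_self
    have hcond : (decide (pvKey (i, x) < pvKey q)) = (decide (pvKeyE x < pvKeyE q.2)) := by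
      have : pvKey (i, x) < pvKey q ↔ pvKeyE x < pvKeyE q.2 := by
        rw [pvKey, pvKey, Prod.Lex.lt_iff]
        have hes : pvES (i, x) = pvKeyE x := rfl
        have hes2 : pvES q = pvKeyE q.2 := rfl
        simp only [ofLex_toLex, hes, hes2]
        constructor
        · rintro (h1 | ⟨h1, h2⟩)
          · exact h1
          · omega
        · intro h1; exact Or.inl h1
      simp [this]
    simp only [List.map_cons]
    rw [pvInsertBy_cons, pvInsertBy_cons, hcond]
    by_cases hc : (decide (pvKeyE x < pvKeyE q.2)) = true
    · rw [if_pos hc, if_pos hc]; rfl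
    · rw [Bool.not_eq_true] at hc
      rw [if_neg (by simp [hc]), if_neg (by simp [hc])]
      simp only [List.map_cons]
      rw [ih (fun p hp => h p (List.mem_cons_of_mem _ hp))]

theorem pvFold_snd :
    ∀ (xs : List (List Int)) (i : Int) (acc : List (Int × List Int)),
      (∀ q ∈ acc, q.1 < i) →
      ((PySem.List.enumerate xs i).foldl
        (fun acc p => PySem.List.insertBy (fun p q => decide (pvKey p < pvKey q)) p acc) acc).map Prod.snd
        = xs.foldl (fun acc x => PySem.List.insertBy (fun a b => decide (pvKeyE a < pvKeyE b)) x acc)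
            (acc.map Prod.snd) := by
  intro xs
  induction xs with
  | nil => intro i acc _; rfl
  | cons x t ih =>
    intro i acc h
    rw [PySem.List.enumerate_cons]
    simp only [List.foldl_cons]
    have hbound : ∀ q ∈ PySem.List.insertBy (fun p q => decide (pvKey p < pvKey q)) (i, x) acc,
        q.1 < i + 1 := by
      intro q hq
      rcases (PySem.List.mem_insertBy _ _ _ _).mp hq with rfl | hq
      · omega
      · have := h q hq; omega
    rw [ih (i + 1) _ hbound, pvIns_snd i x acc h]

theorem pvE_snd (targets : List (List Int)) :
    (pvE targets).map Prod.snd = PySem.List.sorted targets pvKeyE := by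
  rw [pvE, PySem.List.sorted_eq_foldl_insertBy, PySem.List.sorted_eq_foldl_insertBy]
  exact pvFold_snd targets 0 [] (by simp)

-- ---- order facts about pvE ----

theorem pvE_ne (targets : List (List Int)) :
    (pvE targets).Pairwise (fun p q => p.1 ≠ q.1) := by
  rw [pvE, List.Perm.pairwise_iff (fun {x y} h e => h e.symm) (PySem.List.sorted_perm _ _ _)]
  exact (PySem.List.pairwise_lt_enumerate targets 0).imp (fun h => by omega)

theorem pvE_pairwise (targets : List (List Int)) :
    (pvE targets).Pairwise pvLt := by
  have h1 : (pvE targets).Pairwise (fun a b => pvKey a ≤ pvKey b) :=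
    PySem.List.sorted_pairwise _ _
  have h2 := pvE_ne targets
  refine (h1.and h2).imp ?_
  rintro a b ⟨hle, hne⟩
  rw [pvKey_le_iff] at hle
  unfold pvLt
  omega

-- ---- controlled unfolding of pvBloop ----

theorem pvBloop_none {thr a : Int} {pool : List (Int × List Int)}
    (h : PySem.List.min2? (pool.filter (fun p => decide (pvSS p ≥ thr))) pvES (fun p => p.1) = none) :
    pvBloop thr a pool = a := by
  rw [pvBloop]
  split
  · rfl
  · rename_i b hm; rw [h] at hm; simp at hm

theorem pvBloop_some {thr a : Int} {pool : List (Int × List Int)} {b : Int × List Int}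
    (h : PySem.List.min2? (pool.filter (fun p => decide (pvSS p ≥ thr))) pvES (fun p => p.1) = some b) :
    pvBloop thr a pool = pvBloop (pvES b) (a + 1)
      ((pool.filter (fun p => decide (pvSS p ≥ thr))).filter (fun p => decide (p.1 ≠ b.1))) := by
  rw [pvBloop]
  split
  · rename_i hm; rw [h] at hm; simp at hm
  · rename_i b' hm
    rw [h] at hm
    injection hm with hbb
    subst hbb
    rfl

-- a pre-filter by a lower threshold is absorbed by pvBloop's own filter
theorem pvBloop_absorb {thr t a : Int} (X : List (Int × List Int)) (h : thr ≤ t) :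
    pvBloop t a (X.filter (fun p => decide (pvSS p ≥ thr))) = pvBloop t a X := by
  have hf : (X.filter (fun p => decide (pvSS p ≥ thr))).filter (fun p => decide (pvSS p ≥ t))
      = X.filter (fun p => decide (pvSS p ≥ t)) := by
    rw [List.filter_filter]
    apply List.filter_congr
    intro x _
    by_cases hx : pvSS x ≥ t
    · have : pvSS x ≥ thr := le_trans h hx
      simp [hx, this]
    · simp [hx]
  cases hm : PySem.List.min2? (X.filter (fun p => decide (pvSS p ≥ t))) pvES (fun p => p.1) with
  | none =>
    rw [pvBloop_none (by rw [hf]; exact hm), pvBloop_none hm]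
  | some b =>
    rw [pvBloop_some (by rw [hf]; exact hm), pvBloop_some hm, hf]

-- B's loop result is invariant under permuting an fst-distinct pool
theorem pvBloop_perm :
    ∀ (n : Nat) (P Q : List (Int × List Int)) (thr a : Int),
      P.length ≤ n → P.Perm Q → P.Pairwise (fun p q => p.1 ≠ q.1) →
      pvBloop thr a P = pvBloop thr a Q := by
  intro n
  induction n with
  | zero =>
    intro P Q thr a hlen hperm _
    have hP : P = [] := List.length_eq_zero_iff.mp (Nat.le_zero.mp hlen)
    subst hP
    have hQ : Q = [] := hperm.symm.eq_nil
    subst hQ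
    rfl
  | succ n ih =>
    intro P Q thr a hlen hperm hne
    have hpf := hperm.filter (fun p => decide (pvSS p ≥ thr))
    cases hm : PySem.List.min2? (P.filter (fun p => decide (pvSS p ≥ thr))) pvES (fun p => p.1) with
    | none =>
      have hP0 : P.filter (fun p => decide (pvSS p ≥ thr)) = [] := pvMin2_none_iff.mp hm
      have hQ0 : Q.filter (fun p => decide (pvSS p ≥ thr)) = [] := by
        rw [hP0] at hpf; exact hpf.nil_eq.symm
      rw [pvBloop_none hm, pvBloop_none (pvMin2_none_iff.mpr hQ0)]
    | some b =>
      have hneP : (P.filter (fun p => decide (pvSS p ≥ thr))).Pairwise (fun p q => p.1 ≠ q.1) :=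
        hne.filter _
      have hmin := pvMin2_min_or_eq hm hneP
      have hbQ : b ∈ Q.filter (fun p => decide (pvSS p ≥ thr)) := hpf.mem_iff.mp (pvMin2_mem hm)
      have hminQ : ∀ q ∈ Q.filter (fun p => decide (pvSS p ≥ thr)), q = b ∨ pvLt b q := by
        intro q hq
        exact hmin q (hpf.mem_iff.mpr hq)
      have hmQ : PySem.List.min2? (Q.filter (fun p => decide (pvSS p ≥ thr))) pvES (fun p => p.1) = some b :=
        pvMin2_eq hbQ hminQ
      rw [pvBloop_some hm, pvBloop_some hmQ]
      apply ih
      · have h1 : ((P.filter (fun p => decide (pvSS p ≥ thr))).filter (fun p => decide (p.1 ≠ b.1))).length < P.length :=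
          pvBloop_dec P _ _ b (pvMin2_mem hm) (by simp)
        omega
      · exact hpf.filter _
      · exact (hne.filter _).filter _

-- ---- the main correspondence: B's selection loop = A's scan over the sorted pool ----

theorem pvM :
    ∀ (n : Nat) (P : List (Int × List Int)) (thr a : Int),
      P.length ≤ n → P.Pairwise pvLt → P.Pairwise (fun p q => p.1 ≠ q.1) →
      (∀ p ∈ P, thr ≤ pvES p) →
      pvBloop thr a P = a + pvAscan thr (P.map Prod.snd) := by
  intro n
  induction n with
  | zero =>
    intro P thr a hlen _ _ _
    have hP : P = [] := List.length_eq_zero_iff.mp (Nat.le_zero.mp hlen)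
    subst hP
    rw [pvBloop_none (pvMin2_none_iff.mpr rfl)]
    simp [pvAscan]
  | succ n ih =>
    intro P thr a hlen hPw hne hH
    cases hc : P.filter (fun p => decide (pvSS p ≥ thr)) with
    | nil =>
      rw [pvBloop_none (pvMin2_none_iff.mpr hc)]
      have hskip : ∀ x ∈ P.map Prod.snd, ¬ (PySem.List.pyGetD x 0 0 ≥ thr) := by
        intro x hx
        obtain ⟨p, hp, rfl⟩ := List.mem_map.mp hx
        have := List.filter_eq_nil_iff.mp hc p hp
        simpa [pvSS] using this
      have := pvAscan_skip thr (P.map Prod.snd) [] hskip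
      rw [List.append_nil] at this
      rw [this]
      simp [pvAscan]
    | cons b bs =>
      have hfpw : (P.filter (fun p => decide (pvSS p ≥ thr))).Pairwise pvLt := hPw.filter _
      rw [hc] at hfpw
      obtain ⟨hbmin, _⟩ := List.pairwise_cons.mp hfpw
      have hmin2 : PySem.List.min2? (P.filter (fun p => decide (pvSS p ≥ thr))) pvES (fun p => p.1)
          = some b := by
        rw [hc]
        refine pvMin2_eq List.mem_cons_self ?_
        intro q hq
        rcases List.mem_cons.mp hq with rfl | hq
        · exact Or.inl rfl
        · exact Or.inr (hbmin q hq)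
      obtain ⟨P₁, P₂, hPeq, hP₁, hPb, hbs⟩ := List.filter_eq_cons_iff.mp hc
      have hbP : b ∈ P := by rw [hPeq]; exact List.mem_append_right _ List.mem_cons_self
      -- fst-distinctness along the decomposition
      have hneP : (P₁ ++ b :: P₂).Pairwise (fun p q => p.1 ≠ q.1) := by rw [← hPeq]; exact hne
      have hbP₂ : ∀ q ∈ P₂, b.1 ≠ q.1 := by
        have := (List.pairwise_append.mp hneP).2.1
        exact (List.pairwise_cons.mp this).1
      have hPwP : (P₁ ++ b :: P₂).Pairwise pvLt := by rw [← hPeq]; exact hPw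
      have hbP₂lt : ∀ q ∈ P₂, pvLt b q := by
        have := (List.pairwise_append.mp hPwP).2.1
        exact (List.pairwise_cons.mp this).1
      rw [pvBloop_some hmin2, hc]
      -- the filtered candidate list without b is exactly bs
      have hrest : (b :: bs).filter (fun p => decide (p.1 ≠ b.1)) = bs := by
        rw [List.filter_cons]
        simp only [ne_eq, not_true_eq_false, decide_false,
          Bool.false_eq_true, if_false]
        apply List.filter_eq_self.mpr
        intro q hq
        have hqP₂ : q ∈ P₂ := List.mem_of_mem_filter (hbs ▸ hq)
        simpa using (hbP₂ q hqP₂).symm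
      rw [hrest, ← hbs]
      have hthrb : thr ≤ pvES b := hH b hbP
      rw [pvBloop_absorb P₂ hthrb]
      have hlen₂ : P₂.length ≤ n := by
        have : P.length = P₁.length + (P₂.length + 1) := by rw [hPeq]; simp
        omega
      have hPw₂ : P₂.Pairwise pvLt := (List.pairwise_cons.mp (List.pairwise_append.mp hPwP).2.1).2
      have hne₂ : P₂.Pairwise (fun p q => p.1 ≠ q.1) :=
        (List.pairwise_cons.mp (List.pairwise_append.mp hneP).2.1).2
      have hH₂ : ∀ p ∈ P₂, pvES b ≤ pvES p := by
        intro p hp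
        have := hbP₂lt p hp
        unfold pvLt at this; omega
      rw [ih P₂ (pvES b) (a + 1) hlen₂ hPw₂ hne₂ hH₂]
      have hPm : P.map Prod.snd = (P₁.map Prod.snd) ++ (b.2 :: P₂.map Prod.snd) := by
        rw [hPeq]; simp
      have hskip : ∀ x ∈ P₁.map Prod.snd, ¬ (PySem.List.pyGetD x 0 0 ≥ thr) := by
        intro x hx
        obtain ⟨p, hp, rfl⟩ := List.mem_map.mp hx
        have := hP₁ p hp
        simpa [pvSS] using this
      rw [hPm, pvAscan_skip thr _ _ hskip]
      have hsb : PySem.List.pyGetD b.2 0 0 ≥ thr := by simpa [pvSS] using hPb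
      simp only [pvAscan, if_pos hsb]
      have hesb : PySem.List.pyGetD b.2 1 0 = pvES b := rfl
      rw [hesb]
      omega


-- ===== VERDICT (by name: the statement is the Claim_ definition above) =====
-- pyGetD at literal index 0 on a cons cell
theorem pvGetD0 (h0 : List Int) (t : List (List Int)) :
    PySem.List.pyGetD (h0 :: t) 0 [] = h0 := by
  simp [PySem.List.pyGetD, PySem.List.pyGet?, PySem.List.pyIdx?]

theorem pvEnum_ne_nil {targets : List (List Int)} (h : targets ≠ []) :
    PySem.List.enumerate targets ≠ [] := by
  cases targets with
  | nil => exact absurd rfl h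
  | cons x t => rw [PySem.List.enumerate_cons]; simp

theorem solution_spec : Claim_equal_solution := by
  intro targets _ hpre
  unfold Spec_solution
  obtain ⟨hne, _⟩ := hpre
  -- ---- A's value ----
  have hSne : PySem.List.sorted targets (fun x => PySem.List.pyGetD x 1 0) ≠ [] := by
    rw [Ne, PySem.List.sorted_eq_nil_iff]; exact hne
  obtain ⟨h0, t, hS⟩ := List.exists_cons_of_ne_nil hSne
  have hA : solution targets = 1 + pvAscan (PySem.List.pyGetD h0 1 0) t := by
    unfold solution
    simp only [hS, pvGetD0]
    rw [PySem.List.foldl_pyRange_pyGetD (h0 :: t) []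
      (fun (st : Int × Int) x =>
        if PySem.List.pyGetD x 0 0 ≥ st.1 then (PySem.List.pyGetD x 1 0, st.2 + 1) else st)
      (PySem.List.pyGetD h0 1 0, 1) (a := 1) (by norm_num)]
    simp only [Int.toNat_one, List.drop_succ_cons, List.drop_zero]
    rw [pvFoldA]
  -- ---- B's value ----
  have hEne : pvE targets ≠ [] := by
    rw [pvE, Ne, PySem.List.sorted_eq_nil_iff]
    exact pvEnum_ne_nil hne
  obtain ⟨b₀, E', hE⟩ := List.exists_cons_of_ne_nil hEne
  have hEpw := pvE_pairwise targets
  have hEfst := pvE_ne targets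
  rw [hE] at hEpw hEfst
  have hb₀min : ∀ q ∈ PySem.List.enumerate targets, q = b₀ ∨ pvLt b₀ q := by
    intro q hq
    have hqE : q ∈ pvE targets := (PySem.List.mem_sorted _ _ _ _).mpr hq
    rw [hE] at hqE
    rcases List.mem_cons.mp hqE with rfl | hq'
    · exact Or.inl rfl
    · exact Or.inr ((List.pairwise_cons.mp hEpw).1 q hq')
  have hb₀mem : b₀ ∈ PySem.List.enumerate targets := by
    have : b₀ ∈ pvE targets := by rw [hE]; exact List.mem_cons_self
    exact (PySem.List.mem_sorted _ _ _ _).mp this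
  have hmin2b : PySem.List.min2? (PySem.List.enumerate targets) pvES (fun p => p.1) = some b₀ :=
    pvMin2_eq hb₀mem hb₀min
  have hB : solution_alt targets = pvBloop (pvES b₀) 1
      ((PySem.List.enumerate targets).filter (fun p => decide (p.1 ≠ b₀.1))) := by
    simp only [solution_alt]
    rw [hmin2b]
  -- permute the remaining pool into its (end, index)-sorted form E'
  have hpermE : (PySem.List.enumerate targets).Perm (pvE targets) :=
    (PySem.List.sorted_perm _ _ _).symm
  have hE'eq : (pvE targets).filter (fun p => decide (p.1 ≠ b₀.1)) = E' := by
    rw [hE, List.filter_cons]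
    simp only [ne_eq, not_true_eq_false, decide_false, Bool.false_eq_true, if_false]
    apply List.filter_eq_self.mpr
    intro q hq
    have : b₀.1 ≠ q.1 := (List.pairwise_cons.mp hEfst).1 q hq
    simpa using this.symm
  have hfperm : ((PySem.List.enumerate targets).filter (fun p => decide (p.1 ≠ b₀.1))).Perm E' := by
    rw [← hE'eq]
    exact hpermE.filter _
  have hfne : ((PySem.List.enumerate targets).filter (fun p => decide (p.1 ≠ b₀.1))).Pairwise
      (fun p q => p.1 ≠ q.1) :=
    ((PySem.List.pairwise_lt_enumerate targets 0).imp (fun h => by omega)).filter _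
  have hB2 : solution_alt targets = pvBloop (pvES b₀) 1 E' := by
    rw [hB]
    exact pvBloop_perm _ _ E' (pvES b₀) 1 (Nat.le_refl _) hfperm hfne
  -- B's loop over E' is A's scan over its projection
  have hE'pw : E'.Pairwise pvLt := (List.pairwise_cons.mp hEpw).2
  have hE'fst : E'.Pairwise (fun p q => p.1 ≠ q.1) := (List.pairwise_cons.mp hEfst).2
  have hE'H : ∀ p ∈ E', pvES b₀ ≤ pvES p := by
    intro p hp
    have := (List.pairwise_cons.mp hEpw).1 p hp
    unfold pvLt at this; omega
  have hB3 : solution_alt targets = 1 + pvAscan (pvES b₀) (E'.map Prod.snd) := by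
    rw [hB2, pvM E'.length E' (pvES b₀) 1 (Nat.le_refl _) hE'pw hE'fst hE'H]
  -- stability: the sorted projection of the enumerated pool is A's sorted list
  have hsnd := pvE_snd targets
  rw [hE] at hsnd
  have hsnd2 : b₀.2 :: E'.map Prod.snd = h0 :: t := by
    rw [List.map_cons] at hsnd
    rw [hsnd]
    exact hS
  injection hsnd2 with hh ht
  have hes : pvES b₀ = PySem.List.pyGetD h0 1 0 := by unfold pvES; rw [hh]
  rw [hA, hB3, ht, hes]
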